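-- pv_equiv track=rewrite | github.com/Pritom-Paul/C-A-Packing-List-Extractor | Packing List Extractor/extract_invoice.py | find_all_values_below_label
-- ===== SOURCE A (Python) =====
-- def find_all_values_below_label(rows, label):
--     """Find values below all the instance of a label.
--
--     Args:
--         rows: List of rows from the Excel sheet
--         label: The label text to search for (e.g., "ORDER NO:")
--
--     Returns:
--         List of all values found below each instance of the label
--     """
--     values = []
--     for row_idx, row in enumerate(rows):
--         row_values = [str(cell).strip() for cell in row]
--         if label in row_values:
--             col_idx = row_values.index(label)
--             # Look for the next non-empty cell in the same column below
--             for next_row_idx in range(row_idx + 1, len(rows)):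
--                 next_row = rows[next_row_idx]
--                 if col_idx < len(next_row):
--                     cell_value = str(next_row[col_idx]).strip()
--                     if cell_value and cell_value.upper() != "NONE":
--                         if cell_value not in values:  # Avoid duplicates
--                             values.append(cell_value)
--                         break  # Move to next instance of label after finding one value
--     return values if values else None
-- ===== SOURCE B (Python) =====
-- def find_all_values_below_label(rows, label):
--     """One bottom-up pass maintaining, per column, the nearest non-empty non-NONE cell
--     below; each label occurrence is then answered by a dictionary lookup."""
--     n = len(rows)
--     results_at = [None] * n
--     next_good = {}  # col -> nearest "good" stripped cell strictly below the current row
--     for i in range(n - 1, -1, -1):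
--         stripped = [str(cell).strip() for cell in rows[i]]
--         if label in stripped:
--             results_at[i] = next_good.get(stripped.index(label))
--         for j, v in enumerate(stripped):
--             if v and v.upper() != "NONE":
--                 next_good[j] = v
--     values = []
--     for v in results_at:
--         if v is not None and v not in values:
--             values.append(v)
--     return values if values else None
-- ===== Notes on version B (the rewrite author's own statement) =====
-- stated objective: alternative
-- what changed: Replaces A's per-label downward rescan of the remaining rows with a single bottom-up pass that maintains, per column, the nearest non-empty non-'NONE' cell below, answering each label occurrence by one dictionary lookup.
import Mathlib
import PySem

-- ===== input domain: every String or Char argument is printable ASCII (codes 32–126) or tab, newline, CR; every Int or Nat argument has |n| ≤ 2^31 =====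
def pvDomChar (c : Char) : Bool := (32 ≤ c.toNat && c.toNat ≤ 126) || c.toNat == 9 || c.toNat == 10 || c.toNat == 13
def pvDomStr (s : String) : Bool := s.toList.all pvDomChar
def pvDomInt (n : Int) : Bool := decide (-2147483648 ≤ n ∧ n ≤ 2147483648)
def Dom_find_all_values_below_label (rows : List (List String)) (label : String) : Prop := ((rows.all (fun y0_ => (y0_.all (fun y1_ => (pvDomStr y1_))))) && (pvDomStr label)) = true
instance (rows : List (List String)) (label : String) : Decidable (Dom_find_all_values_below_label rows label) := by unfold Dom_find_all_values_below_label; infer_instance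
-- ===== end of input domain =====

-- B replaces A's per-label downward rescan by one bottom-up pass keeping, per column, the
-- nearest non-empty cell below (objective: alternative algorithm, same observed cost).

-- ===== PORT A =====
-- "cell_value and cell_value.upper() != 'NONE'"
def pvGood (v : String) : Bool := !(v == "") && !(PySem.Str.upper v == "NONE")

-- A's inner loop "for next_row_idx in range(row_idx+1, len(rows)) … break": the rows it visits
-- are exactly the rows below the current one, scanned in order with break on the first good cell.
def pvScanBelow (below : List (List String)) (col : Nat) : Option String :=
  match below with
  | [] => none
  | r :: rest =>
    if h : col < r.length then
      let cell_value := PySem.Str.strip r[col]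
      if pvGood cell_value then some cell_value else pvScanBelow rest col
    else pvScanBelow rest col

-- A's outer loop over enumerate(rows); the suffix carried is rows[row_idx:], so the rows below
-- the head are exactly the tail.
def pvALoop (label : String) : List (List String) → List String → List String
  | [], values => values
  | row :: below, values =>
    let row_values := row.map PySem.Str.strip
    let values' :=
      match PySem.List.index? row_values label with
      | none => values
      | some col_idx =>
        match pvScanBelow below col_idx with
        | none => values
        | some v => if values.contains v then values else values ++ [v]
    pvALoop label below values'

def find_all_values_below_label (rows : List (List String)) (label : String) : Option (List String) :=
  let values := pvALoop label rows []
  if values.isEmpty then none else some values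

-- ===== PORT B =====
-- B's "for i in range(n-1, -1, -1)" pass: structural recursion computes the suffix first,
-- i.e. rows are processed bottom-up, threading next_good (col -> nearest good cell below).
def pvBPass (label : String) : List (List String) → List (Option String) × PySem.Dict Int String
  | [] => ([], PySem.Dict.empty)
  | row :: rest =>
    let p := pvBPass label rest
    let stripped := row.map PySem.Str.strip
    let res : Option String :=
      match PySem.List.index? stripped label with
      | none => none
      | some c => p.2.get? (c : Int)
    let ng' := (PySem.List.enumerate stripped).foldl
      (fun d q => if pvGood q.2 then d.insert q.1 q.2 else d) p.2
    (res :: p.1, ng')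

def find_all_values_below_label_alt (rows : List (List String)) (label : String) : Option (List String) :=
  let results_at := (pvBPass label rows).1
  let values := results_at.foldl
    (fun values v? =>
      match v? with
      | none => values
      | some v => if values.contains v then values else values ++ [v]) []
  if values.isEmpty then none else some values

-- ===== PRECONDITION & SPEC =====
def Spec_find_all_values_below_label (rows : List (List String)) (label : String) (out : Option (List String)) : Prop := out = find_all_values_below_label_alt rows label
instance (rows : List (List String)) (label : String) (out : Option (List String)) : Decidable (Spec_find_all_values_below_label rows label out) := by unfold Spec_find_all_values_below_label; infer_instance

-- ===== CLAIM (what is proved, stated in full; the proofs are below) =====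
def Claim_equal_find_all_values_below_label : Prop := ∀ (rows : List (List String)) (label : String), Dom_find_all_values_below_label rows label → Spec_find_all_values_below_label rows label (find_all_values_below_label rows label)

-- ===== LEMMAS AND PROOFS =====

-- the dedup-append step both programs apply to one optional value
def pvUpd (values : List String) (v? : Option String) : List String :=
  match v? with
  | none => values
  | some v => if values.contains v then values else values ++ [v]

-- the optional value each row contributes, given the rows below it
def pvHits (label : String) : List (List String) → List (Option String)
  | [] => []
  | row :: below =>
    (match PySem.List.index? (row.map PySem.Str.strip) label with
     | none => none
     | some c => pvScanBelow below c) :: pvHits label below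

-- keys below s are untouched by the fold over enumerate xs s
lemma pvFold_enum_get?_lt (xs : List String) (s : Int) (d : PySem.Dict Int String) (c : Int)
    (hc : c < s) :
    ((PySem.List.enumerate xs s).foldl
      (fun d q => if pvGood q.2 then d.insert q.1 q.2 else d) d).get? c = d.get? c := by
  induction xs generalizing s d with
  | nil => simp [PySem.List.enumerate]
  | cons x xs ih =>
    rw [PySem.List.enumerate_cons]
    simp only [List.foldl_cons]
    rw [ih (s + 1) _ (by omega)]
    split
    · rw [PySem.Dict.get?_insert_of_ne _ _ (by omega)]
    · rfl

lemma pvFold_enum_get? (xs : List String) (k : Nat) (s : Int) (d : PySem.Dict Int String) :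
    ((PySem.List.enumerate xs s).foldl
      (fun d q => if pvGood q.2 then d.insert q.1 q.2 else d) d).get? (s + (k : Int)) =
    match xs[k]? with
    | some v => if pvGood v then some v else d.get? (s + (k : Int))
    | none => d.get? (s + (k : Int)) := by
  induction xs generalizing k s d with
  | nil => simp [PySem.List.enumerate]
  | cons x xs ih =>
    rw [PySem.List.enumerate_cons]
    simp only [List.foldl_cons]
    cases k with
    | zero =>
      rw [pvFold_enum_get?_lt _ _ _ _ (by omega)]
      simp only [List.getElem?_cons_zero, Int.natCast_zero, add_zero]
      by_cases hg : pvGood x <;> simp [hg, PySem.Dict.get?_insert_self]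
    | succ j =>
      have h1 : s + ((j + 1 : Nat) : Int) = (s + 1) + (j : Int) := by push_cast; ring
      rw [h1, ih j (s + 1)]
      have h2 : ((if pvGood x then d.insert s x else d) : PySem.Dict Int String).get? ((s + 1) + (j : Int)) = d.get? ((s + 1) + (j : Int)) := by
        split
        · rw [PySem.Dict.get?_insert_of_ne _ _ (by omega)]
        · rfl
      simp only [List.getElem?_cons_succ, h2]

-- invariant of B's bottom-up pass: next_good answers exactly A's downward scan
lemma pvBPass_get? (label : String) (rs : List (List String)) (c : Nat) :
    ((pvBPass label rs).2).get? (c : Int) = pvScanBelow rs c := by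
  induction rs with
  | nil => simp [pvBPass, pvScanBelow, PySem.Dict.get?_empty]
  | cons row rest ih =>
    show ((PySem.List.enumerate (row.map PySem.Str.strip) 0).foldl
      (fun d q => if pvGood q.2 then d.insert q.1 q.2 else d) ((pvBPass label rest).2)).get? (c : Int) = _
    have := pvFold_enum_get? (row.map PySem.Str.strip) c 0 ((pvBPass label rest).2)
    rw [zero_add] at this
    rw [this]
    rw [pvScanBelow]
    by_cases h : c < row.length
    · have hget : (row.map PySem.Str.strip)[c]? = some (PySem.Str.strip row[c]) := by
        simp [List.getElem?_map, List.getElem?_eq_getElem h]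
      rw [hget]
      simp only [h, dif_pos]
      split <;> simp [ih]
    · have hget : (row.map PySem.Str.strip)[c]? = none := by
        simp; omega
      rw [hget]
      simp only [h, dif_neg, not_false_iff]
      simpa using ih

-- B's results list is the per-row hit list
lemma pvBPass_fst (label : String) (rs : List (List String)) :
    (pvBPass label rs).1 = pvHits label rs := by
  induction rs with
  | nil => rfl
  | cons row rest ih =>
    show ((match PySem.List.index? (row.map PySem.Str.strip) label with
      | none => none
      | some c => ((pvBPass label rest).2).get? (c : Int)) :: (pvBPass label rest).1) = _
    rw [pvHits, ih]
    congr 1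
    cases h : PySem.List.index? (row.map PySem.Str.strip) label with
    | none => simp
    | some c => simp [pvBPass_get? label rest c]

-- A's loop folds the same hit list through the same dedup-append step
lemma pvALoop_eq_foldl (label : String) (rs : List (List String)) (values : List String) :
    pvALoop label rs values = (pvHits label rs).foldl pvUpd values := by
  induction rs generalizing values with
  | nil => rfl
  | cons row rest ih =>
    rw [pvALoop, pvHits, List.foldl_cons, ih]
    congr 1
    cases h : PySem.List.index? (row.map PySem.Str.strip) label with
    | none => rfl
    | some c => cases pvScanBelow rest c <;> rfl

-- ===== VERDICT (by name: the statement is the Claim_ definition above) =====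
theorem find_all_values_below_label_spec : Claim_equal_find_all_values_below_label := by
  intro rows label _
  show find_all_values_below_label rows label = find_all_values_below_label_alt rows label
  unfold find_all_values_below_label find_all_values_below_label_alt
  rw [pvALoop_eq_foldl, pvBPass_fst]
  rfl
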